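-- pv_equiv track=rewrite | github.com/dem-volodymyr/refactoring | slot_machine_api/slots/services.py | longest_seq
-- ===== SOURCE A (Python) =====
-- def longest_seq(hit):
--     """Find the longest sequence of consecutive indices."""
--     sub_seq_length, longest = 1, 1
--     start, end = 0, 0
--     for i in range(len(hit) - 1):
--         if hit[i] == hit[i + 1] - 1:
--             sub_seq_length += 1
--             if sub_seq_length > longest:
--                 longest = sub_seq_length
--                 start = i + 2 - sub_seq_length
--                 end = i + 2
--         else:
--             sub_seq_length = 1
--     return hit[start:end]
-- ===== SOURCE B (Python) =====
-- def longest_seq(hit):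
--     """Find the longest sequence of consecutive indices."""
--     # Enumerate maximal consecutive-by-1 runs as (start, end) index pairs.
--     runs = []
--     s = 0
--     for i in range(len(hit) - 1):
--         if hit[i] != hit[i + 1] - 1:
--             runs.append((s, i + 1))
--             s = i + 1
--     runs.append((s, len(hit)))
--     good = [r for r in runs if r[1] - r[0] >= 2]
--     if not good:
--         return hit[0:0]
--     a, b = max(good, key=lambda r: r[1] - r[0])
--     return hit[a:b]
-- ===== Notes on version B (the rewrite author's own statement) =====
-- stated objective: alternative
-- what changed: B first enumerates all maximal consecutive-by-1 runs as (start,end) index pairs in one pass, then filters to runs of length >= 2 and picks the first longest with max(key=length), instead of A's interleaved counter/best-slice bookkeeping inside the loop.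
import Mathlib
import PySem

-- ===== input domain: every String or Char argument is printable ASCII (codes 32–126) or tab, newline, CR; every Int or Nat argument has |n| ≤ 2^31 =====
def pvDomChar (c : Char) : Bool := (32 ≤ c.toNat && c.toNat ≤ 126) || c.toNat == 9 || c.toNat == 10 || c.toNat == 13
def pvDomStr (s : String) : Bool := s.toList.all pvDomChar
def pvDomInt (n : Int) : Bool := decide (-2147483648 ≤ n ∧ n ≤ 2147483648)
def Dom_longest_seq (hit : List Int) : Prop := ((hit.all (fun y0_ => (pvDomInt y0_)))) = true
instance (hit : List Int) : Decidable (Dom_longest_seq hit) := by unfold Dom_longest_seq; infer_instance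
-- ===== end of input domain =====

-- B separates run enumeration from selection (collect maximal consecutive runs, then pick the
-- first longest with Python max) instead of A's interleaved counter/slice bookkeeping; objective: alternative.

-- ===== PORT A =====
-- state (sub_seq_length, longest, start, end)
def pvStepA (hit : List Int) (acc : Int × Int × Int × Int) (i : Int) : Int × Int × Int × Int :=
  if PySem.List.pyGetD hit i 0 = PySem.List.pyGetD hit (i + 1) 0 - 1 then
    if acc.1 + 1 > acc.2.1 then (acc.1 + 1, acc.1 + 1, i + 2 - (acc.1 + 1), i + 2)
    else (acc.1 + 1, acc.2.1, acc.2.2.1, acc.2.2.2)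
  else (1, acc.2.1, acc.2.2.1, acc.2.2.2)

def longest_seq (hit : List Int) : List Int :=
  let st := (PySem.List.pyRange 0 ((hit.length : Int) - 1) 1).foldl (pvStepA hit) (1, 1, 0, 0)
  PySem.List.slice hit (some st.2.2.1) (some st.2.2.2)

-- ===== PORT B =====
-- state (runs, s): closed runs so far and the start of the current run
def pvStepB (hit : List Int) (acc : List (Int × Int) × Int) (i : Int) : List (Int × Int) × Int :=
  if PySem.List.pyGetD hit i 0 ≠ PySem.List.pyGetD hit (i + 1) 0 - 1 then
    (acc.1 ++ [(acc.2, i + 1)], i + 1)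
  else acc

def longest_seq_alt (hit : List Int) : List Int :=
  let p := (PySem.List.pyRange 0 ((hit.length : Int) - 1) 1).foldl (pvStepB hit) ([], 0)
  let runs := p.1 ++ [(p.2, (hit.length : Int))]
  let good := runs.filter (fun r => decide (2 ≤ r.2 - r.1))
  match PySem.List.max? good (fun r => r.2 - r.1) with
  | none => PySem.List.slice hit (some 0) (some 0)
  | some m => PySem.List.slice hit (some m.1) (some m.2)

-- ===== PRECONDITION & SPEC =====
def Spec_longest_seq (hit : List Int) (out : List Int) : Prop := out = longest_seq_alt hit
instance (hit : List Int) (out : List Int) : Decidable (Spec_longest_seq hit out) := by unfold Spec_longest_seq; infer_instance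

-- ===== CLAIM (what is proved, stated in full; the proofs are below) =====
def Claim_equal_longest_seq : Prop := ∀ (hit : List Int), Dom_longest_seq hit → Spec_longest_seq hit (longest_seq hit)

-- ===== LEMMAS AND PROOFS =====

-- best run so far: (length, start, end), first strictly-longer wins, init (1,0,0)
def pvBestStep (acc : Int × Int × Int) (r : Int × Int) : Int × Int × Int :=
  if r.2 - r.1 > acc.1 then (r.2 - r.1, r.1, r.2) else acc

def pvBestRun (rs : List (Int × Int)) : Int × Int × Int := rs.foldl pvBestStep (1, 0, 0)

lemma pvBestStep_fst_le (acc : Int × Int × Int) (r : Int × Int) : acc.1 ≤ (pvBestStep acc r).1 := by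
  unfold pvBestStep; split; · simp; omega
  · simp

lemma pvBestRun_fst_ge (rs : List (Int × Int)) : 1 ≤ (pvBestRun rs).1 := by
  unfold pvBestRun
  have h : ∀ (l : List (Int × Int)) (init : Int × Int × Int),
      init.1 ≤ (l.foldl pvBestStep init).1 := by
    intro l
    induction l with
    | nil => intro init; simp
    | cons r t ih =>
      intro init
      calc init.1 ≤ (pvBestStep init r).1 := pvBestStep_fst_le init r
        _ ≤ (List.foldl pvBestStep (pvBestStep init r) t).1 := ih _
  simpa using h rs (1, 0, 0)

lemma pvBestRun_append (rs : List (Int × Int)) (r : Int × Int) :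
    pvBestRun (rs ++ [r]) = pvBestStep (pvBestRun rs) r := by
  simp [pvBestRun, List.foldl_append]

lemma pvMax?_append {α : Type} (l : List α) (x : α) (key : α → Int) :
    PySem.List.max? (l ++ [x]) key =
      (match PySem.List.max? l key with
       | none => some x
       | some m => if key m < key x then some x else some m) := by
  simp only [PySem.List.max?, List.foldl_append]
  rfl

-- selection: pvBestRun equals Python's max over the ≥2-length runs (first maximal), default (1,0,0)
lemma pvSel (rs : List (Int × Int)) :
    pvBestRun rs =
      (match PySem.List.max? (rs.filter (fun r => decide (2 ≤ r.2 - r.1))) (fun r => r.2 - r.1) with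
       | none => ((1 : Int), (0 : Int), (0 : Int))
       | some m => (m.2 - m.1, m.1, m.2)) := by
  induction rs using List.reverseRecOn with
  | nil => rfl
  | append_singleton rs r ih =>
    rw [pvBestRun_append, List.filter_append]
    by_cases hr : 2 ≤ r.2 - r.1
    · have hf : List.filter (fun r => decide (2 ≤ r.2 - r.1)) [r] = [r] := by
        simp [List.filter, hr]
      rw [hf, pvMax?_append]
      cases hm : PySem.List.max? (rs.filter (fun r => decide (2 ≤ r.2 - r.1))) (fun r => r.2 - r.1) with
      | none =>
        rw [hm] at ih
        rw [ih]
        simp [pvBestStep]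
        omega
      | some m =>
        rw [hm] at ih
        rw [ih]
        by_cases hlt : m.2 - m.1 < r.2 - r.1
        · simp [pvBestStep, hlt]
        · simp [pvBestStep, hlt]
    · have hf : List.filter (fun r => decide (2 ≤ r.2 - r.1)) [r] = [] := by
        simp [List.filter, hr]
      rw [hf, List.append_nil]
      rw [← ih]
      have h1 : 1 ≤ (pvBestRun rs).1 := pvBestRun_fst_ge rs
      unfold pvBestStep
      split
      · omega
      · rfl

-- main loop invariant: A's state after k steps is (k+1 - s, pvBestRun (runs ++ [(s, k+1)]))
lemma pvInv (hit : List Int) (k : Nat) :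
    (PySem.List.pyRange 0 (k : Int) 1).foldl (pvStepA hit) (1, 1, 0, 0) =
      (((k : Int) + 1) - ((PySem.List.pyRange 0 (k : Int) 1).foldl (pvStepB hit) ([], 0)).2,
       pvBestRun ((((PySem.List.pyRange 0 (k : Int) 1).foldl (pvStepB hit) ([], 0)).1) ++
         [(((PySem.List.pyRange 0 (k : Int) 1).foldl (pvStepB hit) ([], 0)).2, (k : Int) + 1)])) := by
  induction k with
  | zero =>
    simp [PySem.List.pyRange_one_eq_nil (by norm_num : (0:Int) ≤ 0)]
    simp [pvBestRun, pvBestStep, List.foldl]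
  | succ k ih =>
    have hk : ((k + 1 : Nat) : Int) = (k : Int) + 1 := by push_cast; ring
    rw [hk, PySem.List.pyRange_one_succ_right (by positivity : (0:Int) ≤ (k : Int)),
        List.foldl_append, List.foldl_append, ih]
    set B := (PySem.List.pyRange 0 (k : Int) 1).foldl (pvStepB hit) ([], 0) with hB
    obtain ⟨rs, s⟩ := B
    simp only [List.foldl]
    by_cases hc : PySem.List.pyGetD hit (k : Int) 0 = PySem.List.pyGetD hit ((k : Int) + 1) 0 - 1
    · -- run continues: B's state unchanged, A extends the partial run
      have hBstep : pvStepB hit (rs, s) (k : Int) = (rs, s) := by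
        unfold pvStepB; rw [if_neg (not_not_intro hc)]
      rw [hBstep, pvBestRun_append, pvBestRun_append]
      obtain ⟨L0, a0, b0⟩ := pvBestRun rs
      simp only [pvStepA, pvBestStep, if_pos hc]
      split_ifs <;> simp_all <;> try omega
    · -- run breaks: B closes the run, A resets the counter and keeps its best
      have hBstep : pvStepB hit (rs, s) (k : Int) = (rs ++ [(s, (k : Int) + 1)], (k : Int) + 1) := by
        unfold pvStepB
        split
        next h => rfl
        next h => exact absurd (not_not.mp h) hc
      rw [hBstep]
      have h2 : pvBestRun ((rs ++ [(s, (k : Int) + 1)]) ++ [((k : Int) + 1, (k : Int) + 1 + 1)]) =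
          pvBestRun (rs ++ [(s, (k : Int) + 1)]) := by
        rw [pvBestRun_append]
        have := pvBestRun_fst_ge (rs ++ [(s, (k : Int) + 1)])
        unfold pvBestStep
        split
        · omega
        · rfl
      simp only [pvStepA, if_neg hc, h2]
      norm_num

-- ===== VERDICT (by name: the statement is the Claim_ definition above) =====
theorem longest_seq_spec : Claim_equal_longest_seq := by
  unfold Claim_equal_longest_seq
  intro hit _
  unfold Spec_longest_seq
  cases hit with
  | nil => decide
  | cons x xs =>
    unfold longest_seq longest_seq_alt
    have hlen : ((x :: xs).length : Int) - 1 = (xs.length : Int) := by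
      push_cast [List.length_cons]; ring
    have hlen2 : ((xs.length : Int)) + 1 = ((x :: xs).length : Int) := by
      push_cast [List.length_cons]; ring
    rw [hlen]
    have H := pvInv (x :: xs) xs.length
    rw [hlen2] at H
    set B := (PySem.List.pyRange 0 (xs.length : Int) 1).foldl (pvStepB (x :: xs)) ([], 0) with hB
    rw [H]
    have hsel := pvSel (B.1 ++ [(B.2, ((x :: xs).length : Int))])
    rw [hsel]
    cases hm : PySem.List.max? ((B.1 ++ [(B.2, ((x :: xs).length : Int))]).filter
        (fun r => decide (2 ≤ r.2 - r.1))) (fun r => r.2 - r.1) with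
    | none => simp only [hm]
    | some m => simp only [hm]
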